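-- pv_equiv track=rewrite | github.com/AlyElsharkawy/DOOMEncoder | EncryptionLib.py | AlyFullEncode
-- ===== SOURCE A (Python) =====
-- standardCharactersAly = ["a","b","c","d","e","f","g","h","i","j","k","l","m","n","o","p","q","r","s","t","u","v","w","x","y","z","1","2","3","4","5","6","7","8","9","0","A","B","C","D","E","F","G","H","I","J","K","L","M","N","O","P","Q","R","S","T","U","V","W","X","Y","Z",",","!","+","=","/","_","<",">","[","]","@","#","$","%","^","&","*","(",")","-","'",'"',":",";","?","~","\\","|","{","}","`"," ","."]
--
-- garbledCharactersAly = ["%","D","v","2","/","x","L","&","a","K","X",",","!","#","l","=","5","C","*","W","\\","Y","(","z","4","U","^","f","]","I","7","j","6","+","J","[","F","$","B","m","n","i",")","H","M","Z","<",".","e","V","E","w","`","g","-","o","8",'"',"1",";","3","d","0","c","9","T","@","h","b","t","_","u",":","k","p","|","s","G","'","r","{","A","q","~","N",">","O","?","P","y","}","S","Q","R"," "]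
--
-- def AlyFastEncode(inputText):
--     outputText = ""
--     for word in inputText:
--         for letter in word:
--             #finding the index of the letter
--             indexNumber = standardCharactersAly.index(letter)
--             outputText += garbledCharactersAly[indexNumber]
--     return outputText
--
-- def AlyFullEncode(usableInput):
-- 	binaryString = " ".join(format(ord(i), "b") for i in usableInput)
-- 	#making a list of binary letters that will be treated as numbers
-- 	binaryList = binaryString.split()
-- 	hexadecimalString = ""
-- 	#Converting list to hexadecimal
-- 	for i in range(len(binaryList)):
-- 		number = int(binaryList[i],2)
-- 		hexadecimalNumber = hex(number)
-- 		hexadecimalString += str(hexadecimalNumber)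
-- 	#removing the 0x part
-- 	hexaPartsList = hexadecimalString.split("0x")
-- 	#final output
-- 	finalHexadecimalString = ""
-- 	for i in hexaPartsList:
-- 		finalHexadecimalString += str(i)
-- 	garbledhexString = AlyFastEncode(AlyFastEncode(AlyFastEncode(AlyFastEncode(AlyFastEncode(AlyFastEncode(AlyFastEncode(finalHexadecimalString)))))))
-- 	return garbledhexString
-- ===== SOURCE B (Python) =====
-- standardCharactersAly = ["a","b","c","d","e","f","g","h","i","j","k","l","m","n","o","p","q","r","s","t","u","v","w","x","y","z","1","2","3","4","5","6","7","8","9","0","A","B","C","D","E","F","G","H","I","J","K","L","M","N","O","P","Q","R","S","T","U","V","W","X","Y","Z",",","!","+","=","/","_","<",">","[","]","@","#","$","%","^","&","*","(",")","-","'",'"',":",";","?","~","\\","|","{","}","`"," ","."]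
--
-- garbledCharactersAly = ["%","D","v","2","/","x","L","&","a","K","X",",","!","#","l","=","5","C","*","W","\\","Y","(","z","4","U","^","f","]","I","7","j","6","+","J","[","F","$","B","m","n","i",")","H","M","Z","<",".","e","V","E","w","`","g","-","o","8",'"',"1",";","3","d","0","c","9","T","@","h","b","t","_","u",":","k","p","|","s","G","'","r","{","A","q","~","N",">","O","?","P","y","}","S","Q","R"," "]
--
-- _SUB = dict(zip(standardCharactersAly, garbledCharactersAly))
--
-- def _garble7(ch):
--     # the substitution cipher applied 7 times to one character
--     for _ in range(7):
--         ch = _SUB[ch]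
--     return ch
--
-- # the whole pipeline, fused per source character: each code point < 128 maps to the
-- # 7-times-garbled image of its lowercase-hex representation.  Computed once at import.
-- _ENC = {chr(n): ''.join(_garble7(d) for d in format(n, "x")) for n in range(128)}
--
-- def AlyFullEncode(usableInput):
--     return ''.join(_ENC[c] for c in usableInput)
-- ===== Notes on version B (the rewrite author's own statement) =====
-- stated objective: faster
-- what changed: B precomputes, once at import, a table mapping every code point < 128 straight to the 7-times-garbled image of its lowercase-hex digits (composing the hex formatting and all seven cipher passes ahead of time), so encoding is a single dict lookup per input character; A instead makes a binary join/split pass, an int(...,2)/hex()/prefix-split pass, and seven full-string substitution passes each doing a linear list.index scan per character.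
import Mathlib
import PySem

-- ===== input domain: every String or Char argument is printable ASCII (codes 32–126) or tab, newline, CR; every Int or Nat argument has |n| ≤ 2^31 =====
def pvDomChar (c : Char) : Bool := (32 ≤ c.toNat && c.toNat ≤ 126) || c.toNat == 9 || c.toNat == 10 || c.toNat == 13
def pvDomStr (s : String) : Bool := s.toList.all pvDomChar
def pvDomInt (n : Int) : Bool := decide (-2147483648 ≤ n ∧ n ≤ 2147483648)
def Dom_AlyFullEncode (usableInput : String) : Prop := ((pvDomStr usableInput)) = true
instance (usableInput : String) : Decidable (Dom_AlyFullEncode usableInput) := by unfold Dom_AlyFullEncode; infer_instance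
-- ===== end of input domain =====

-- B fuses the whole pipeline into one precomputed per-character table (hex image garbled 7
-- times, built once for all code points < 128) and a single lookup pass over the input,
-- replacing A's binary join/split, int(...,2)/hex()/prefix-split passes and its seven
-- full-string cipher passes of per-character list.index scans (objective: faster).

-- ===== PORT A =====
-- module constants (lists of 1-character strings in Python; ported as List Char)
def stdAly : List Char := ['a','b','c','d','e','f','g','h','i','j','k','l','m','n','o','p','q','r','s','t','u','v','w','x','y','z','1','2','3','4','5','6','7','8','9','0','A','B','C','D','E','F','G','H','I','J','K','L','M','N','O','P','Q','R','S','T','U','V','W','X','Y','Z',',','!','+','=','/','_','<','>','[',']','@','#','$','%','^','&','*','(',')','-','\'','"',':',';','?','~','\\','|','{','}','`',' ','.']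

def grbAly : List Char := ['%','D','v','2','/','x','L','&','a','K','X',',','!','#','l','=','5','C','*','W','\\','Y','(','z','4','U','^','f',']','I','7','j','6','+','J','[','F','$','B','m','n','i',')','H','M','Z','<','.','e','V','E','w','`','g','-','o','8','"','1',';','3','d','0','c','9','T','@','h','b','t','_','u',':','k','p','|','s','G','\'','r','{','A','q','~','N','>','O','?','P','y','}','S','Q','R',' ']

-- lowercase hex digits of a Nat, no prefix: exact for the digits of hex(n), n ≥ 0 (MSB-first, built by appending)
def pvHexDigit (n : Nat) : Char := ['0','1','2','3','4','5','6','7','8','9','a','b','c','d','e','f'].getD n '0'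
def pvHexCoreF : Nat → Nat → List Char
  | 0, _ => []
  | f+1, n => if n = 0 then [] else pvHexCoreF f (n / 16) ++ [pvHexDigit (n % 16)]
def pvHexCore (n : Nat) : List Char := pvHexCoreF n n
def pvHexChars (n : Nat) : List Char := if n = 0 then ['0'] else pvHexCore n

-- for letter in a 1-character string: the inner Python loop runs once over [word].
-- '.getD letter' is the unreachable ValueError/IndexError branch (letter always in stdAly here).
def AlyFastEncode (inputText : String) : String :=
  String.ofList (inputText.toList.foldl (fun outputText word =>
    [word].foldl (fun outputText letter =>
      outputText ++ [((PySem.List.index? stdAly letter).bind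
        (fun indexNumber => PySem.List.pyGet? grbAly (indexNumber : Int))).getD letter]) outputText) [])

-- hex(number) for 0 ≤ number is "0x" ++ lowercase hex digits (number = ord i ≥ 9 here)
def AlyFullEncode (usableInput : String) : String :=
  let binaryString := PySem.Chars.join [' ']
    (usableInput.toList.map (fun i => PySem.Int.toBinChars (i.toNat : Int)))
  let binaryList := PySem.Chars.split₀ binaryString
  let hexadecimalString := (PySem.List.pyRange 0 (PySem.List.len binaryList) 1).foldl
    (fun acc i =>
      let number := (PySem.Int.ofCharsBase? (PySem.List.pyGetD binaryList i []) 2).getD 0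
      acc ++ ('0' :: 'x' :: pvHexChars number.toNat)) []
  let hexaPartsList := PySem.Chars.splitOn hexadecimalString ['0','x']
  let finalHexadecimalString := hexaPartsList.foldl (fun acc i => acc ++ i) []
  AlyFastEncode (AlyFastEncode (AlyFastEncode (AlyFastEncode (AlyFastEncode (AlyFastEncode
    (AlyFastEncode (String.ofList finalHexadecimalString)))))))

-- ===== PORT B =====
-- _SUB = dict(zip(standardCharactersAly, garbledCharactersAly))
def subDictB : PySem.Dict Char Char := PySem.Dict.mk (stdAly.zip grbAly)

-- _garble7: the substitution applied 7 times to one character ('.getD ch' = unreachable KeyError branch)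
def garble7B (ch : Char) : Char :=
  (List.range 7).foldl (fun ch _ => (subDictB.get? ch).getD ch) ch

-- format(n, "x"): B's hex formatter, digits produced LSB-first and reversed at the end
def pvHexRevBF : Nat → Nat → List Char
  | 0, _ => []
  | f+1, n => if n = 0 then []
      else (['0','1','2','3','4','5','6','7','8','9','a','b','c','d','e','f'].getD (n % 16) '0') :: pvHexRevBF f (n / 16)
def pvHexRevB (n : Nat) : List Char := pvHexRevBF n n
def pvFmtHexB (n : Nat) : List Char := if n = 0 then ['0'] else (pvHexRevB n).reverse

-- _ENC = {chr(n): ''.join(_garble7(d) for d in format(n,'x')) for n in range(128)}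
def encTableB : PySem.Dict Char (List Char) :=
  PySem.Dict.mk ((List.range 128).map (fun n => (Char.ofNat n, (pvFmtHexB n).map garble7B)))

-- ''.join(_ENC[c] for c in usableInput) ('.getD []' = unreachable KeyError branch on Dom)
def AlyFullEncode_alt (usableInput : String) : String :=
  String.ofList (usableInput.toList.flatMap (fun c => (encTableB.get? c).getD []))

-- ===== PRECONDITION & SPEC =====
def Spec_AlyFullEncode (usableInput : String) (out : String) : Prop := out = AlyFullEncode_alt usableInput
instance (usableInput : String) (out : String) : Decidable (Spec_AlyFullEncode usableInput out) := by unfold Spec_AlyFullEncode; infer_instance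

-- ===== CLAIM (what is proved, stated in full; the proofs are below) =====
def Claim_equal_AlyFullEncode : Prop := ∀ (usableInput : String), Dom_AlyFullEncode usableInput → Spec_AlyFullEncode usableInput (AlyFullEncode usableInput)

-- ===== LEMMAS AND PROOFS =====

-- the per-character cipher step of port A, and its 7-fold application to a string
def fStepA (c : Char) : Char :=
  ((PySem.List.index? stdAly c).bind
    (fun i => PySem.List.pyGet? grbAly (i : Int))).getD c
def sevenA (l : List Char) : List Char :=
  ((((((l.map fStepA).map fStepA).map fStepA).map fStepA).map fStepA).map fStepA).map fStepA

theorem fast_eq_map (s : List Char) :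
    AlyFastEncode (String.ofList s) = String.ofList (s.map fStepA) := by
  unfold AlyFastEncode
  rw [String.toList_ofList]
  congr 1
  have h := PySem.List.foldl_append_singleton_eq_map fStepA s []
  simp only [List.nil_append] at h
  simpa only [List.foldl_cons, List.foldl_nil] using h

theorem hexDigit_mem (n : Nat) :
    pvHexDigit n ∈ ['0','1','2','3','4','5','6','7','8','9','a','b','c','d','e','f'] := by
  by_cases h : n < 16
  · interval_cases n <;> decide
  · have hnone : (['0','1','2','3','4','5','6','7','8','9','a','b','c','d','e','f'][n]?) = none :=
      List.getElem?_eq_none (by simpa using Nat.le_of_not_lt h)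
    unfold pvHexDigit
    simp [List.getD, hnone]

theorem hexCoreF_mem (f n : Nat) :
    ∀ c ∈ pvHexCoreF f n, c ∈ ['0','1','2','3','4','5','6','7','8','9','a','b','c','d','e','f'] := by
  induction f generalizing n with
  | zero => intro c hc; simp [pvHexCoreF] at hc
  | succ f ih =>
    intro c hc
    rw [pvHexCoreF] at hc
    split at hc
    · simp at hc
    · rcases List.mem_append.mp hc with h1 | h1
      · exact ih (n / 16) c h1
      · simp at h1; subst h1; exact hexDigit_mem _

theorem hexCore_mem (n : Nat) :
    ∀ c ∈ pvHexCore n, c ∈ ['0','1','2','3','4','5','6','7','8','9','a','b','c','d','e','f'] :=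
  hexCoreF_mem n n

theorem hexChars_ne_nil (n : Nat) : pvHexChars n ≠ [] := by
  unfold pvHexChars
  split
  · simp
  · next h =>
    obtain ⟨f, rfl⟩ : ∃ f, n = f + 1 := ⟨n - 1, by omega⟩
    rw [pvHexCore, pvHexCoreF]
    simp

set_option maxRecDepth 4000 in
theorem hexChars_no_x (n : Nat) : ∀ c ∈ pvHexChars n, c ≠ 'x' := by
  intro c hc
  have h16' : c ∈ ['0','1','2','3','4','5','6','7','8','9','a','b','c','d','e','f'] := by
    unfold pvHexChars at hc
    split at hc
    · simp at hc; subst hc; decide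
    · exact hexCore_mem n c hc
  have sub : (['0','1','2','3','4','5','6','7','8','9','a','b','c','d','e','f'].all
      (fun c => !(c == 'x'))) = true := by decide
  simp only [List.all_eq_true, Bool.not_eq_true', beq_eq_false_iff_ne, ne_eq] at sub
  exact sub c h16'

-- split₀ of " ".join(pieces) for nonempty, whitespace-free pieces
theorem split0_skip_piece (p rest cur : List Char) (acc : List (List Char))
    (hp : ∀ c ∈ p, PySem.Chars.isspace c = false) :
    PySem.Chars.split₀.go (p ++ rest) cur acc = PySem.Chars.split₀.go rest (p.reverse ++ cur) acc := by
  induction p generalizing cur with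
  | nil => simp
  | cons c p ih =>
    rw [List.cons_append, PySem.Chars.split₀.go]
    rw [hp c (by simp)]
    simp only [Bool.false_eq_true, if_false]
    rw [ih (c :: cur) (fun d hd => hp d (by simp [hd]))]
    simp

theorem split0_sep (rest cur : List Char) (acc : List (List Char)) (h : cur ≠ []) :
    PySem.Chars.split₀.go (' ' :: rest) cur acc = PySem.Chars.split₀.go rest [] (cur.reverse :: acc) := by
  rw [PySem.Chars.split₀.go]
  have hs : PySem.Chars.isspace ' ' = true := by decide
  simp [hs, h]

theorem split0_join (ps : List (List Char)) (acc : List (List Char))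
    (h : ∀ p ∈ ps, p ≠ [] ∧ ∀ c ∈ p, PySem.Chars.isspace c = false) :
    PySem.Chars.split₀.go (PySem.Chars.join [' '] ps) [] acc = acc.reverse ++ ps := by
  induction ps generalizing acc with
  | nil =>
    rw [show PySem.Chars.join [' '] [] = ([] : List Char) by simp [PySem.Chars.join, List.intercalate]]
    rw [PySem.Chars.split₀.go]
    simp
  | cons p ps ih =>
    obtain ⟨hne, hsp⟩ := h p (by simp)
    cases ps with
    | nil =>
      rw [show PySem.Chars.join [' '] [p] = p ++ [] by simp [PySem.Chars.join, List.intercalate]]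
      rw [split0_skip_piece p [] [] acc hsp]
      rw [PySem.Chars.split₀.go]
      simp [hne]
    | cons q qs =>
      rw [show PySem.Chars.join [' '] (p :: q :: qs) = p ++ (' ' :: PySem.Chars.join [' '] (q :: qs)) by
        simp [PySem.Chars.join, List.intercalate, List.intersperse]]
      rw [split0_skip_piece p _ [] acc hsp, split0_sep _ _ _ (by simpa using hne)]
      rw [ih _ (fun r hr => h r (by simp [hr]))]
      simp

-- splitOn "0x" of a concatenation of "0x"-prefixed, nonempty, 'x'-free pieces
theorem splitOn_skip_piece (p : List Char) (fuel : Nat) (rest cur : List Char) (acc : List (List Char))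
    (hx : ∀ c ∈ p, c ≠ 'x')
    (hr : rest = [] ∨ ∃ r', rest = '0' :: 'x' :: r')
    (hf : p.length ≤ fuel) :
    PySem.Chars.splitOn.go ['0','x'] fuel (p ++ rest) cur acc
      = PySem.Chars.splitOn.go ['0','x'] (fuel - p.length) rest (p.reverse ++ cur) acc := by
  induction p generalizing fuel cur with
  | nil => simp
  | cons c p ih =>
    have hf' : p.length + 1 ≤ fuel := by simpa using hf
    obtain ⟨f, rfl⟩ : ∃ f, fuel = f + 1 := ⟨fuel - 1, by omega⟩
    rw [List.cons_append, PySem.Chars.splitOn.go]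
    have hpre : (['0','x'] : List Char).isPrefixOf (c :: (p ++ rest)) = false := by
      cases p with
      | nil =>
        rcases hr with rfl | ⟨r', rfl⟩
        · simp [List.isPrefixOf]
        · simp [List.isPrefixOf]
      | cons d p' =>
        have hd : d ≠ 'x' := hx d (by simp)
        simp only [List.cons_append, List.isPrefixOf, Bool.and_true,
          Bool.and_eq_false_iff, beq_eq_false_iff_ne, ne_eq]
        by_cases h0 : '0' = c
        · right; exact fun h => hd h.symm
        · left; exact fun h => h0 h
    rw [hpre]
    simp only [Bool.false_eq_true, if_false]
    rw [ih f (c :: cur) (fun d hd => hx d (by simp [hd])) (by omega)]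
    simp only [List.reverse_cons, List.append_assoc, List.cons_append, List.nil_append,
      List.length_cons]
    congr 1
    omega

theorem splitOn_go_flat (ps : List (List Char)) (fuel : Nat) (cur : List Char) (acc : List (List Char))
    (h : ∀ p ∈ ps, p ≠ [] ∧ ∀ c ∈ p, c ≠ 'x')
    (hf : (ps.map (fun p => '0' :: 'x' :: p)).flatten.length < fuel) :
    PySem.Chars.splitOn.go ['0','x'] fuel (ps.map (fun p => '0' :: 'x' :: p)).flatten cur acc
      = acc.reverse ++ (cur.reverse :: ps) := by
  induction ps generalizing fuel cur acc with
  | nil =>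
    obtain ⟨f, rfl⟩ : ∃ f, fuel = f + 1 := ⟨fuel - 1, by omega⟩
    rw [List.map_nil, List.flatten_nil, PySem.Chars.splitOn.go]
    simp
    omega
  | cons p ps ih =>
    simp only [List.map_cons, List.flatten_cons, List.length_append, List.length_cons] at hf ⊢
    obtain ⟨f, rfl⟩ : ∃ f, fuel = f + 1 := ⟨fuel - 1, by omega⟩
    rw [List.cons_append, PySem.Chars.splitOn.go]
    rw [show (['0','x'] : List Char).isPrefixOf ('0' :: ('x' :: p ++ (ps.map (fun p => '0' :: 'x' :: p)).flatten)) = true from by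
      simp [List.isPrefixOf]]
    simp only [if_true]
    rw [show List.drop (['0','x'] : List Char).length ('0' :: ('x' :: p ++ (ps.map (fun p => '0' :: 'x' :: p)).flatten)) = p ++ (ps.map (fun p => '0' :: 'x' :: p)).flatten from by simp]
    rw [splitOn_skip_piece p f _ [] (cur.reverse :: acc) (h p (by simp)).2
      (by cases ps with
        | nil => left; simp
        | cons q qs => right; exact ⟨q ++ (qs.map (fun p => '0' :: 'x' :: p)).flatten, by simp⟩)
      (by omega)]
    rw [show p.reverse ++ ([] : List Char) = p.reverse from List.append_nil _]
    rw [ih (f - p.length) p.reverse (cur.reverse :: acc) (fun r hr => h r (by simp [hr])) (by omega)]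
    simp

theorem splitOn_flat (ps : List (List Char))
    (h : ∀ p ∈ ps, p ≠ [] ∧ ∀ c ∈ p, c ≠ 'x') :
    PySem.Chars.splitOn (ps.map (fun p => '0' :: 'x' :: p)).flatten ['0','x'] = [] :: ps := by
  unfold PySem.Chars.splitOn
  rw [splitOn_go_flat ps _ [] [] h (by omega)]
  simp

-- format(n, "b") of a code point < 127: nonempty, whitespace-free, and int(·, 2) round-trips
set_option maxRecDepth 4000 in
theorem bin_facts : ((List.range 127).all (fun n =>
    !(PySem.Int.toBinChars (n:Int)).isEmpty &&
    (PySem.Int.toBinChars (n:Int)).all (fun c => !(PySem.Chars.isspace c)) &&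
    (PySem.Int.ofCharsBase? (PySem.Int.toBinChars (n:Int)) 2 == some (n:Int)))) = true := by decide

theorem bin_fact (n : Nat) (h : n < 127) :
    (PySem.Int.toBinChars (n:Int) ≠ [] ∧ (∀ c ∈ PySem.Int.toBinChars (n:Int), PySem.Chars.isspace c = false))
      ∧ PySem.Int.ofCharsBase? (PySem.Int.toBinChars (n:Int)) 2 = some (n:Int) := by
  have hb := bin_facts
  simp only [List.all_eq_true, List.mem_range, Bool.and_eq_true, beq_iff_eq,
    Bool.not_eq_true', List.isEmpty_eq_false_iff] at hb
  obtain ⟨⟨h1, h2⟩, h3⟩ := hb n h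
  exact ⟨⟨by simpa using h1, fun c hc => h2 c hc⟩, h3⟩

-- THE BRIDGE: B's table entry for a code point < 127 is the 7-fold A-cipher image of A's
-- hex digits: a generic first-match lookup lemma for the range-built dict, plus finite
-- checks over the 16 hex digits and the 127 code points
theorem hexChars_mem16 (n : Nat) :
    ∀ c ∈ pvHexChars n, c ∈ ['0','1','2','3','4','5','6','7','8','9','a','b','c','d','e','f'] := by
  intro c hc
  unfold pvHexChars at hc
  split at hc
  · simp at hc; subst hc; decide
  · exact hexCore_mem n c hc

set_option maxRecDepth 2000 in
theorem toNat_ofNat128 : ((List.range 128).all (fun n => (Char.ofNat n).toNat == n)) = true := by decide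

theorem toNat_ofNat_lt (n : Nat) (h : n < 128) : (Char.ofNat n).toNat = n := by
  have hb := toNat_ofNat128
  simp only [List.all_eq_true, List.mem_range, beq_iff_eq] at hb
  exact hb n h

theorem get?_mk_ofNat (v : Nat → List Char) (l : List Nat) (k : Nat)
    (hl : ∀ n ∈ l, n < 128) (hk : k < 128) (hmem : k ∈ l) :
    (PySem.Dict.mk (l.map (fun n => (Char.ofNat n, v n)))).get? (Char.ofNat k) = some (v k) := by
  induction l with
  | nil => cases hmem
  | cons n l ih =>
    rw [List.map_cons, PySem.Dict.get?_mk_cons]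
    by_cases h : n = k
    · subst h; simp
    · have hne : Char.ofNat n ≠ Char.ofNat k := fun he => h (by
        have h2 := congrArg Char.toNat he
        rwa [toNat_ofNat_lt n (hl n (by simp)), toNat_ofNat_lt k hk] at h2)
      rw [show (Char.ofNat n == Char.ofNat k) = false from beq_eq_false_iff_ne.mpr hne]
      simp only [Bool.false_eq_true, if_false]
      exact ih (fun m hm => hl m (by simp [hm])) (by
        rcases List.mem_cons.mp hmem with rfl | hm
        · exact absurd rfl h
        · exact hm)

-- the 7-fold per-character cipher, as a single function
def stepA7 (c : Char) : Char :=
  fStepA (fStepA (fStepA (fStepA (fStepA (fStepA (fStepA c))))))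

theorem sevenA_eq_map (l : List Char) : sevenA l = l.map stepA7 := by
  simp only [sevenA, List.map_map]
  exact List.map_congr_left (fun c _ => by simp only [Function.comp_apply, stepA7])

set_option maxRecDepth 8000 in
theorem digit7 : ((['0','1','2','3','4','5','6','7','8','9','a','b','c','d','e','f'] : List Char).all
    (fun d => stepA7 d == garble7B d)) = true := by decide

set_option maxRecDepth 8000 in
theorem fmt_eq_bool : ((List.range 127).all (fun n => pvHexChars n == pvFmtHexB n)) = true := by decide

theorem fmt_eq (n : Nat) (h : n < 127) : pvHexChars n = pvFmtHexB n := by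
  have hb := fmt_eq_bool
  simp only [List.all_eq_true, List.mem_range, beq_iff_eq] at hb
  exact hb n h

theorem enc_entry (c : Char) (h : c.toNat < 127) :
    (encTableB.get? c).getD [] = sevenA (pvHexChars c.toNat) := by
  have hget : encTableB.get? (Char.ofNat c.toNat) = some ((pvFmtHexB c.toNat).map garble7B) :=
    get?_mk_ofNat (fun n => (pvFmtHexB n).map garble7B) (List.range 128) c.toNat
      (fun m hm => List.mem_range.mp hm) (by omega) (List.mem_range.mpr (by omega))
  rw [Char.ofNat_toNat c] at hget
  rw [hget, sevenA_eq_map, fmt_eq c.toNat h]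
  simp only [Option.getD_some]
  refine (List.map_congr_left (fun d hd => ?_)).symm
  have hd16 : d ∈ ['0','1','2','3','4','5','6','7','8','9','a','b','c','d','e','f'] := by
    rw [← fmt_eq c.toNat h] at hd
    exact hexChars_mem16 c.toNat d hd
  have hb := digit7
  simp only [List.all_eq_true, beq_iff_eq] at hb
  exact hb d hd16

theorem sevenA_flatten (L : List (List Char)) :
    sevenA L.flatten = (L.map sevenA).flatten := by
  simp only [sevenA, List.map_flatten, List.map_map]
  rfl

theorem AlyFullEncode_spec : Claim_equal_AlyFullEncode := by
  intro u hdom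
  unfold Spec_AlyFullEncode
  have hchar : ∀ c ∈ u.toList, c.toNat < 127 := by
    intro c hc
    have h := List.all_eq_true.mp hdom c hc
    simp only [pvDomChar, Bool.or_eq_true, Bool.and_eq_true, decide_eq_true_eq, beq_iff_eq] at h
    omega
  simp only [AlyFullEncode, AlyFullEncode_alt]
  -- step 1: the binary split returns the per-character binary strings
  have h1 : PySem.Chars.split₀ (PySem.Chars.join [' ']
      (u.toList.map (fun i => PySem.Int.toBinChars (i.toNat : Int))))
      = u.toList.map (fun i => PySem.Int.toBinChars (i.toNat : Int)) := by
    unfold PySem.Chars.split₀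
    rw [split0_join _ [] ?conds]
    · simp
    case conds =>
      intro p hp
      obtain ⟨c, hc, rfl⟩ := List.mem_map.mp hp
      exact (bin_fact c.toNat (hchar c hc)).1
  rw [h1]
  -- step 2: the index loop over binaryList is a fold over it
  rw [PySem.List.foldl_pyRange_zero_pyGetD
    (u.toList.map (fun i => PySem.Int.toBinChars (i.toNat : Int))) []
    (fun acc b => acc ++ ('0' :: 'x' :: pvHexChars ((PySem.Int.ofCharsBase? b 2).getD 0).toNat)) []]
  rw [PySem.List.foldl_append_eq_flatMap
    (fun b => ('0' :: 'x' :: pvHexChars ((PySem.Int.ofCharsBase? b 2).getD 0).toNat))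
    (u.toList.map (fun i => PySem.Int.toBinChars (i.toNat : Int))) []]
  -- step 3: per character, int(bin, 2) round-trips and hex() yields "0x" ++ hex digits
  rw [show (u.toList.map (fun i => PySem.Int.toBinChars (i.toNat : Int))).flatMap
      (fun b => ('0' :: 'x' :: pvHexChars ((PySem.Int.ofCharsBase? b 2).getD 0).toNat))
      = ((u.toList.map (fun c => pvHexChars c.toNat)).map (fun p => '0' :: 'x' :: p)).flatten from by
    rw [List.flatMap_def, List.map_map, List.map_map]
    congr 1
    refine List.map_congr_left (fun c hc => ?_)
    simp only [Function.comp]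
    rw [(bin_fact c.toNat (hchar c hc)).2]
    simp]
  simp only [List.nil_append]
  -- step 4: the "0x" split recovers the hex-digit pieces; rejoining concatenates them
  rw [splitOn_flat (u.toList.map (fun c => pvHexChars c.toNat))
    (fun p hp => by
      obtain ⟨c, hc, rfl⟩ := List.mem_map.mp hp
      exact ⟨hexChars_ne_nil c.toNat, hexChars_no_x c.toNat⟩)]
  rw [PySem.List.foldl_append_eq_flatMap (fun (i : List Char) => i)
    ([] :: u.toList.map (fun c => pvHexChars c.toNat)) []]
  simp only [List.nil_append, List.flatMap_def, List.map_id', List.flatten_cons]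
  -- step 5: seven cipher passes over the flattened hex string = flatten of per-character
  -- 7-fold images, which are exactly B's table entries
  rw [fast_eq_map, fast_eq_map, fast_eq_map, fast_eq_map, fast_eq_map, fast_eq_map, fast_eq_map]
  rw [show ∀ l : List Char,
      ((((((l.map fStepA).map fStepA).map fStepA).map fStepA).map fStepA).map fStepA).map fStepA
        = sevenA l from fun _ => rfl]
  rw [sevenA_flatten, List.map_map]
  refine congrArg String.ofList (congrArg List.flatten (List.map_congr_left (fun c hc => ?_)))
  exact (enc_entry c (hchar c hc)).symm
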